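-- pv_equiv track=rewrite | github.com/souravskr/data-structures-algorithms | Code-chef&HackerRank/length_of_word.py | my_fn
-- ===== SOURCE A (Python) =====
-- import collections
--
-- def my_fn(word):
--     size = len(word)
--     end = size - 1
--     num = ''
--     for i in range(size):
--         if word[i].isdigit():
--             num += word[i]
--             if i == end:
--                 num += ' '
--
--         else:
--             num += ' '
--     res_lst = collections.Counter([int(x) for x in num.split()])
--     return len(res_lst)
-- ===== SOURCE B (Python) =====
-- def my_fn(word):
--     seen = set()
--     i = 0
--     n = len(word)
--     while i < n:
--         if word[i].isdigit():
--             j = i + 1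
--             while j < n and word[j].isdigit():
--                 j += 1
--             seen.add(int(word[i:j]))
--             i = j
--         else:
--             i += 1
--     return len(seen)
-- ===== Notes on version B (the rewrite author's own statement) =====
-- stated objective: simpler
-- what changed: B drops A's masked-string intermediary (copy digits, blank out everything else, re-split on whitespace, Counter) and instead scans the string once with an index, slicing out each maximal digit run directly and collecting its int value in a set whose size is returned.
import Mathlib
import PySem

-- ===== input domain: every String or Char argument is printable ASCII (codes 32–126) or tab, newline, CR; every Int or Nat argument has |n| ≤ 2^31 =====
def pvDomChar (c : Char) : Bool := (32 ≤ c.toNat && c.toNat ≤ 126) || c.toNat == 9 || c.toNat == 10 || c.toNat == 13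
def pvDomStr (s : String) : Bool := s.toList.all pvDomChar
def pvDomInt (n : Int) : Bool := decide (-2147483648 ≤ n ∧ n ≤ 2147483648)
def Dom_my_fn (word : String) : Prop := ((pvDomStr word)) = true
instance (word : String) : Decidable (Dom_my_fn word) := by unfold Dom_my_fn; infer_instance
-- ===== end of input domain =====

-- B replaces A's masked-string + split + Counter pipeline by one direct scan over the
-- string that slices off each maximal digit run and collects its int value in a set (objective: simpler).

-- ===== PORT A =====
def my_fn (word : String) : Int :=
  let cs := word.toList
  let size := cs.length
  let endI : Int := (size : Int) - 1
  let num : List Char := (PySem.List.enumerate cs).foldl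
    (fun num ic =>
      if PySem.Chars.isdigit ic.2 then
        let num' := num ++ [ic.2]
        if ic.1 = endI then num' ++ [' '] else num'
      else num ++ [' ']) []
  -- int(x) on a whitespace-split token: ofChars?; tokens are digit runs, so it never fails
  let ints := (PySem.Chars.split₀ num).map (fun x => (PySem.Int.ofChars? x).getD 0)
  ((PySem.Dict.counter ints).size : Int)

-- ===== PORT B =====
-- helper used by the port for termination of the run-slicing loop
theorem pvDrop_lt (p : Char → Bool) (c : Char) (rest : List Char) :
    (rest.dropWhile p).length < (c :: rest).length :=
  Nat.lt_succ_of_le (List.length_dropWhile_le p rest)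

-- the while loop of Source B: slice off a maximal digit run (rest[:k]) and continue on rest[k:]
def pvRuns : List Char → List (List Char)
  | [] => []
  | c :: rest =>
    if PySem.Chars.isdigit c then
      (c :: rest.takeWhile PySem.Chars.isdigit) :: pvRuns (rest.dropWhile PySem.Chars.isdigit)
    else pvRuns rest
termination_by cs => cs.length
decreasing_by
  · exact pvDrop_lt _ _ _
  · simp

def my_fn_alt (word : String) : Int :=
  -- seen accumulates int(run) for each run, in order: set(...) of that list
  ((PySem.Set.ofList ((pvRuns word.toList).map
      (fun r => (PySem.Int.ofChars? r).getD 0))).length : Int)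

-- ===== PRECONDITION & SPEC =====
def Spec_my_fn (word : String) (out : Int) : Prop := out = my_fn_alt word
instance (word : String) (out : Int) : Decidable (Spec_my_fn word out) := by unfold Spec_my_fn; infer_instance

-- ===== CLAIM (what is proved, stated in full; the proofs are below) =====
def Claim_equal_my_fn : Prop := ∀ (word : String), Dom_my_fn word → Spec_my_fn word (my_fn word)

-- ===== LEMMAS AND PROOFS =====

-- A's masked string, without the trailing-space quirk: digit chars kept, others become ' '
def pvMask (cs : List Char) : List Char :=
  cs.flatMap (fun c => if PySem.Chars.isdigit c then [c] else [' '])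

-- per-element contribution of A's loop body
def pvH (e : Int) (ic : Int × Char) : List Char :=
  if PySem.Chars.isdigit ic.2 then (if ic.1 = e then [ic.2, ' '] else [ic.2]) else [' ']

theorem pv_digit_not_space (c : Char) (h : PySem.Chars.isdigit c = true) :
    PySem.Chars.isspace c = false := by
  simp only [PySem.Chars.isdigit, Bool.and_eq_true, decide_eq_true_eq, Char.le_def,
    UInt32.le_iff_toNat_le] at h
  have h' : 48 ≤ c.val.toNat ∧ c.val.toNat ≤ 57 := by
    simpa [show ('0').val.toNat = 48 from rfl, show ('9').val.toNat = 57 from rfl] using h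
  simp only [PySem.Chars.isspace, Bool.or_eq_false_iff, Bool.and_eq_false_iff,
    decide_eq_false_iff_not, Char.toNat]
  omega

-- the index test i == end never fires when e is outside the index range
theorem pv_flatMap_h (e : Int) : ∀ (cs : List Char) (s : Int), s + cs.length ≤ e →
    (PySem.List.enumerate cs s).flatMap (pvH e) = pvMask cs := by
  intro cs
  induction cs with
  | nil => intro s _; simp [PySem.List.enumerate_nil, pvMask]
  | cons c rest ih =>
    intro s hs
    rw [PySem.List.enumerate_cons]
    have hne : s ≠ e := by
      have : (0:Int) ≤ rest.length := by positivity
      simp at hs; omega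
    simp only [List.flatMap_cons, pvMask, pvH, hne, if_false]
    have := ih (s + 1) (by simp at hs ⊢; omega)
    simp only [pvMask] at this
    rw [this]

-- A's foldl produces acc ++ flatMap of the per-element contributions
theorem pv_foldl_eq_flatMap (e : Int) (l : List (Int × Char)) (acc : List Char) :
    l.foldl (fun num ic =>
      if PySem.Chars.isdigit ic.2 then
        let num' := num ++ [ic.2]
        if ic.1 = e then num' ++ [' '] else num'
      else num ++ [' ']) acc = acc ++ l.flatMap (pvH e) := by
  have h : ∀ (num : List Char) (ic : Int × Char),
      (if PySem.Chars.isdigit ic.2 then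
        let num' := num ++ [ic.2]
        if ic.1 = e then num' ++ [' '] else num'
      else num ++ [' ']) = num ++ pvH e ic := by
    intro num ic; simp only [pvH]; split_ifs <;> simp
  have h2 := PySem.List.foldl_congr_mem (l := l) (init := acc)
    (f := fun num ic =>
      if PySem.Chars.isdigit ic.2 then
        let num' := num ++ [ic.2]
        if ic.1 = e then num' ++ [' '] else num'
      else num ++ [' '])
    (g := fun num ic => num ++ pvH e ic) (by intro a x _; exact h a x)
  rw [h2, PySem.List.foldl_append_eq_flatMap]

-- num (the masked string A builds) = pvMask cs ++ trailing space iff the last char is a digit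
theorem pv_num_eq (cs : List Char) :
    (PySem.List.enumerate cs).foldl (fun num ic =>
      if PySem.Chars.isdigit ic.2 then
        let num' := num ++ [ic.2]
        if ic.1 = (cs.length : Int) - 1 then num' ++ [' '] else num'
      else num ++ [' ']) [] =
    pvMask cs ++ (match cs.getLast? with
      | some c => if PySem.Chars.isdigit c then [' '] else []
      | none => []) := by
  induction cs using List.reverseRecOn with
  | nil => simp [PySem.List.enumerate, pvMask]
  | append_singleton xs x _ =>
    rw [pv_foldl_eq_flatMap]
    have he : PySem.List.enumerate (xs ++ [x]) 0 =
        PySem.List.enumerate xs 0 ++ [((0 : Int) + xs.length, x)] := by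
      rw [PySem.List.enumerate_append]; simp [PySem.List.enumerate_cons, PySem.List.enumerate_nil]
    rw [he, List.flatMap_append]
    have hlen : ((xs ++ [x]).length : Int) - 1 = (xs.length : Int) := by simp
    rw [hlen, pv_flatMap_h (xs.length : Int) xs 0 (by simp)]
    simp only [List.flatMap_cons, List.flatMap_nil, List.append_nil, pvH, pvMask,
      List.flatMap_append, List.getLast?_append, List.getLast?_singleton]
    simp only [zero_add]
    split_ifs <;> simp_all

-- a trailing space never changes s.split()
theorem pv_go_trailing_space : ∀ (l cur : List Char) (acc : List (List Char)),
    PySem.Chars.split₀.go (l ++ [' ']) cur acc = PySem.Chars.split₀.go l cur acc := by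
  intro l
  induction l with
  | nil =>
    intro cur acc
    by_cases h : cur.isEmpty <;>
      simp [PySem.Chars.split₀.go, h, show PySem.Chars.isspace ' ' = true from rfl]
  | cons c rest ih =>
    intro cur acc
    by_cases hs : PySem.Chars.isspace c <;> by_cases hc : cur.isEmpty <;>
      simp [PySem.Chars.split₀.go, hs, hc, ih]

-- the accumulator of split₀.go only prefixes the result
theorem pv_go_acc : ∀ (l cur : List Char) (acc : List (List Char)),
    PySem.Chars.split₀.go l cur acc = acc.reverse ++ PySem.Chars.split₀.go l cur [] := by
  intro l
  induction l with
  | nil =>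
    intro cur acc
    by_cases h : cur.isEmpty <;> simp [PySem.Chars.split₀.go, h]
  | cons c rest ih =>
    intro cur acc
    by_cases hs : PySem.Chars.isspace c
    · by_cases hc : cur.isEmpty
      · simp only [PySem.Chars.split₀.go, hs, hc, if_true]
        exact ih [] acc
      · simp only [PySem.Chars.split₀.go, hs, hc, if_true, Bool.false_eq_true, if_false]
        rw [ih [] (cur.reverse :: acc), ih [] [cur.reverse]]
        simp
    · simp only [PySem.Chars.split₀.go, hs, Bool.false_eq_true, if_false]
      exact ih (c :: cur) acc

-- split of the masked string, mid-run: cur holds the reversed prefix of the current run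
theorem pv_go_mask_run : ∀ (cs cur : List Char) (acc : List (List Char)), cur ≠ [] →
    PySem.Chars.split₀.go (pvMask cs) cur acc =
      acc.reverse ++ (cur.reverse ++ cs.takeWhile PySem.Chars.isdigit) ::
        PySem.Chars.split₀ (pvMask (cs.dropWhile PySem.Chars.isdigit)) := by
  intro cs
  induction cs with
  | nil =>
    intro cur acc hcur
    simp [pvMask, PySem.Chars.split₀.go, List.isEmpty_iff, hcur, PySem.Chars.split₀]
  | cons c rest ih =>
    intro cur acc hcur
    by_cases hd : PySem.Chars.isdigit c
    · have hns := pv_digit_not_space c hd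
      simp only [pvMask, List.flatMap_cons, hd, if_true, List.singleton_append]
      rw [show ∀ l a b, PySem.Chars.split₀.go (c :: l) a b =
            if PySem.Chars.isspace c = true then
              (if a.isEmpty then PySem.Chars.split₀.go l [] b
               else PySem.Chars.split₀.go l [] (a.reverse :: b))
            else PySem.Chars.split₀.go l (c :: a) b from fun _ _ _ => rfl]
      simp only [hns, Bool.false_eq_true, if_false]
      rw [show (rest.flatMap fun c => if PySem.Chars.isdigit c = true then [c] else [' ']) = pvMask rest from rfl]
      rw [ih (c :: cur) acc (by simp)]
      simp [hd, pvMask]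
    · have hsp : PySem.Chars.isspace ' ' = true := rfl
      have hL : PySem.Chars.split₀.go (pvMask (c :: rest)) cur acc
          = PySem.Chars.split₀.go (pvMask rest) [] (cur.reverse :: acc) := by
        simp [pvMask, hd, PySem.Chars.split₀.go, hsp, List.isEmpty_iff, hcur]
      rw [hL, pv_go_acc]
      rw [show List.dropWhile PySem.Chars.isdigit (c :: rest) = c :: rest from by
        simp [hd]]
      rw [show List.takeWhile PySem.Chars.isdigit (c :: rest) = ([] : List Char) from by
        simp [hd]]
      rw [show PySem.Chars.split₀ (pvMask (c :: rest)) = PySem.Chars.split₀.go (pvMask rest) [] [] from by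
        simp [PySem.Chars.split₀, pvMask, hd, PySem.Chars.split₀.go, hsp]]
      simp

-- split() of A's masked string = B's digit runs (strong induction: the tail after a run is shorter)
theorem pv_split_mask_bounded : ∀ (n : Nat) (cs : List Char), cs.length ≤ n → ∀ (acc : List (List Char)),
    PySem.Chars.split₀.go (pvMask cs) [] acc = acc.reverse ++ pvRuns cs := by
  intro n
  induction n with
  | zero =>
    intro cs hcs acc
    have : cs = [] := List.eq_nil_of_length_eq_zero (Nat.le_zero.mp hcs)
    subst this
    simp [pvMask, PySem.Chars.split₀.go, pvRuns]
  | succ n ih =>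
    intro cs hcs acc
    match cs with
    | [] => simp [pvMask, PySem.Chars.split₀.go, pvRuns]
    | c :: rest =>
      by_cases hd : PySem.Chars.isdigit c
      · have hns := pv_digit_not_space c hd
        simp only [pvMask, List.flatMap_cons, hd, if_true, List.singleton_append]
        rw [show ∀ l a b, PySem.Chars.split₀.go (c :: l) a b =
              if PySem.Chars.isspace c = true then
                (if a.isEmpty then PySem.Chars.split₀.go l [] b
                 else PySem.Chars.split₀.go l [] (a.reverse :: b))
              else PySem.Chars.split₀.go l (c :: a) b from fun _ _ _ => rfl]
        simp only [hns, Bool.false_eq_true, if_false]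
        rw [show (rest.flatMap fun c => if PySem.Chars.isdigit c = true then [c] else [' ']) = pvMask rest from rfl]
        rw [pv_go_mask_run rest [c] acc (by simp)]
        have hlen : (rest.dropWhile PySem.Chars.isdigit).length ≤ n := by
          have h1 := List.length_dropWhile_le PySem.Chars.isdigit rest
          simp at hcs; omega
        have : PySem.Chars.split₀ (pvMask (rest.dropWhile PySem.Chars.isdigit)) =
            pvRuns (rest.dropWhile PySem.Chars.isdigit) := by
          have := ih (rest.dropWhile PySem.Chars.isdigit) hlen []
          simpa [PySem.Chars.split₀] using this
        rw [this]
        simp [pvRuns, hd]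
      · simp only [pvMask, List.flatMap_cons, hd, Bool.false_eq_true, if_false,
          List.singleton_append]
        rw [show ∀ l b, PySem.Chars.split₀.go (' ' :: l) [] b = PySem.Chars.split₀.go l [] b from by
          intro l b; simp [PySem.Chars.split₀.go, show PySem.Chars.isspace ' ' = true from rfl]]
        rw [show (rest.flatMap fun c => if PySem.Chars.isdigit c = true then [c] else [' ']) = pvMask rest from rfl]
        have hlen : rest.length ≤ n := by simp at hcs; omega
        rw [ih rest hlen acc]
        simp [pvRuns, hd]

theorem pv_split_mask (cs : List Char) : PySem.Chars.split₀ (pvMask cs) = pvRuns cs := by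
  have := pv_split_mask_bounded cs.length cs (le_refl _) []
  simpa [PySem.Chars.split₀] using this

-- ===== VERDICT (by name: the statement is the Claim_ definition above) =====
theorem my_fn_spec : Claim_equal_my_fn := by
  intro word _
  unfold Spec_my_fn my_fn my_fn_alt
  simp only []
  rw [pv_num_eq word.toList]
  have hsplit : PySem.Chars.split₀ (pvMask word.toList ++ (match word.toList.getLast? with
      | some c => if PySem.Chars.isdigit c then [' '] else []
      | none => [])) = pvRuns word.toList := by
    match h : word.toList.getLast? with
    | none => simp [pv_split_mask]
    | some c =>
      by_cases hd : PySem.Chars.isdigit c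
      · simp only [hd, if_true]
        show PySem.Chars.split₀.go _ [] [] = _
        rw [pv_go_trailing_space]
        exact pv_split_mask word.toList
      · simp [hd, pv_split_mask]
  rw [hsplit]
  have hsz : ∀ (l : List Int), ((PySem.Dict.counter l).size : Int) = ((PySem.Set.ofList l).length : Int) := by
    intro l
    have : (PySem.Dict.counter l).size = (PySem.Dict.counter l).keys.length := by
      simp [PySem.Dict.size, PySem.Dict.keys]
    rw [show (PySem.Dict.counter l).size = (PySem.Dict.counter l).keys.length from this,
        PySem.Dict.keys_counter]
  exact hsz _
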